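-- pv_equiv track=rewrite | github.com/MahonriM/WeIrd-String | weirdString.py | wird
-- ===== SOURCE A (Python) =====
-- def wird(string):
--     new_string=''
--     count=0
--     for i in string:
--         if i ==' ':
--             new_string+=' '
--             count=0
--         else:
--             if(count%2!=0):
--                 i=i
--                 new_string+=i
--             elif(count%2==0):
--                 i=i.upper()
--                 new_string+=i
--             count+=1
--     return new_string
-- ===== SOURCE B (Python) =====
-- def wird(string):
--     return ' '.join(
--         ''.join(c.upper() if i % 2 == 0 else c for i, c in enumerate(word))
--         for word in string.split(' ')
--     )
-- ===== Notes on version B (the rewrite author's own statement) =====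
-- stated objective: idiomatic
-- what changed: Replaces the flat single-pass character loop with a mutable counter reset at spaces by a split(' ')/enumerate/join decomposition that uppercases even-index characters of each word with no running state.
import Mathlib
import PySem

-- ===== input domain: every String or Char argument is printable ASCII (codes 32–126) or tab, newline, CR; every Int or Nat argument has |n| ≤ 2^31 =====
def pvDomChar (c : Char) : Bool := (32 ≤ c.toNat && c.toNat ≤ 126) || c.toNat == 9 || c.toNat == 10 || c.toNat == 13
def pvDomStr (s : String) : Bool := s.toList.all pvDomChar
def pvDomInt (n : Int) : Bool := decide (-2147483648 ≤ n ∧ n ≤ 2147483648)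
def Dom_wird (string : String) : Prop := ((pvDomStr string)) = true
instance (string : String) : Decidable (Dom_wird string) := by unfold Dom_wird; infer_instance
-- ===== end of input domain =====

-- B replaces A's flat one-pass loop (running counter reset at spaces) by a split(' ')/enumerate/join decomposition; same results, idiomatic.

-- ===== PORT A =====
-- one step of A's for-loop over the characters: state = (new_string, count)
def wirdStep (st : List Char × Int) (i : Char) : List Char × Int :=
  if i = ' ' then (st.1 ++ [' '], 0)
  else if PySem.Int.mod st.2 2 ≠ 0 then (st.1 ++ [i], st.2 + 1)
  else (st.1 ++ [PySem.Chars.upperChar i], st.2 + 1)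

def wird (string : String) : String :=
  String.ofList (string.toList.foldl wirdStep ([], 0)).1

-- ===== PORT B =====
-- ''.join(c.upper() if i % 2 == 0 else c for i, c in enumerate(word))
def wirdWord (w : List Char) : List Char :=
  (PySem.List.enumerate w).map
    (fun p => if PySem.Int.mod p.1 2 == 0 then PySem.Chars.upperChar p.2 else p.2)

def wird_alt (string : String) : String :=
  String.ofList (PySem.Chars.join [' '] ((string.toList.splitOn ' ').map wirdWord))

-- ===== PRECONDITION & SPEC =====
def Spec_wird (string : String) (out : String) : Prop := out = wird_alt string
instance (string : String) (out : String) : Decidable (Spec_wird string out) := by unfold Spec_wird; infer_instance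

-- ===== CLAIM (what is proved, stated in full; the proofs are below) =====
def Claim_equal_wird : Prop := ∀ (string : String), Dom_wird string → Spec_wird string (wird string)

-- ===== LEMMAS AND PROOFS =====

-- common recursive specification: output of the rest of the string, with current count k
def wirdG : List Char → Int → List Char
  | [], _ => []
  | c :: cs, k =>
    if c = ' ' then ' ' :: wirdG cs 0
    else (if PySem.Int.mod k 2 ≠ 0 then c else PySem.Chars.upperChar c) :: wirdG cs (k + 1)

-- word transform with a shifted enumerate start
def wirdWordFrom (w : List Char) (k : Int) : List Char :=
  (PySem.List.enumerate w k).map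
    (fun p => if PySem.Int.mod p.1 2 == 0 then PySem.Chars.upperChar p.2 else p.2)

theorem foldl_wirdStep (cs : List Char) (acc : List Char) (k : Int) :
    (cs.foldl wirdStep (acc, k)).1 = acc ++ wirdG cs k := by
  induction cs generalizing acc k with
  | nil => simp [wirdG]
  | cons c cs ih =>
    by_cases h : c = ' '
    · simp [wirdStep, wirdG, h, ih, List.append_assoc]
    · simp only [List.foldl_cons, wirdStep, wirdG, if_neg h]
      split_ifs <;> simp [ih, List.append_assoc]

theorem wirdG_split (cs : List Char) (k : Int) :
    wirdG cs k =
      wirdWordFrom ((cs.splitOn ' ').headI) k ++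
        (((cs.splitOn ' ').tail).map wirdWord).flatMap (fun w => ' ' :: w) := by
  induction cs generalizing k with
  | nil =>
    simp [wirdG, List.splitOn, List.splitOnP_nil, wirdWordFrom]
  | cons c cs ih =>
    by_cases h : c = ' '
    · subst h
      rcases hs : cs.splitOn ' ' with _ | ⟨w, ws⟩
      · exact absurd hs (List.splitOnP_ne_nil _ _)
      · have := ih 0
        rw [hs] at this
        simp only [wirdG, List.splitOn, List.splitOnP_cons] at *
        simp_all [wirdWordFrom, List.flatMap_cons, wirdWord]
    · rcases hs : cs.splitOn ' ' with _ | ⟨w, ws⟩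
      · exact absurd hs (List.splitOnP_ne_nil _ _)
      · have hbeq : (c == ' ') = false := by simp [h]
        have := ih (k + 1)
        rw [hs] at this
        simp only [wirdG, if_neg h, List.splitOn, List.splitOnP_cons, hbeq,
          if_neg (by simp : ¬ ((false : Bool) = true))] at *
        rw [hs] at *
        simp only [List.modifyHead, List.headI, List.tail]
        rw [this]
        by_cases h2 : PySem.Int.mod k 2 ≠ 0 <;>
          simp_all [wirdWordFrom, PySem.List.enumerate_cons, PySem.Int.mod]

theorem join_eq_flatMap (w : List Char) (ws : List (List Char)) :
    PySem.Chars.join [' '] (w :: ws) = w ++ ws.flatMap (fun u => ' ' :: u) := by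
  induction ws generalizing w with
  | nil => simp [PySem.Chars.join_singleton]
  | cons v vs ih =>
    rw [PySem.Chars.join_cons_cons, ih]
    simp [List.flatMap_cons, List.append_assoc]

-- ===== VERDICT (by name: the statement is the Claim_ definition above) =====
theorem wird_spec : Claim_equal_wird := by
  intro s _
  show wird s = wird_alt s
  unfold wird wird_alt
  rcases hs : s.toList.splitOn ' ' with _ | ⟨w, ws⟩
  · exact absurd hs (List.splitOnP_ne_nil _ _)
  · rw [foldl_wirdStep, wirdG_split, hs, List.map_cons, join_eq_flatMap]
    simp [wirdWordFrom, wirdWord]
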